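-- pv_equiv track=rewrite | github.com/lwcsjzz/PythonPrimer | 7.3.py | chu
-- ===== SOURCE A (Python) =====
-- def chu(s):
--     a = []
--     for i in s:
--         if i in a:
--             a.remove(i)
--             a.append(i)
--         else:
--             a.append(i)
--     return(a)
-- ===== SOURCE B (Python) =====
-- def chu(s):
--     items = list(s)
--     seen = set()
--     out = []
--     for i in reversed(items):
--         if i not in seen:
--             seen.add(i)
--             out.append(i)
--     out.reverse()
--     return out
-- ===== Notes on version B (the rewrite author's own statement) =====
-- stated objective: faster
-- what changed: Replaces A's quadratic move-to-end list mutation (membership scan + remove on the result list per element) with a single backward scan keeping a seen-set, appending each element at its last occurrence, then one final reversal.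
import Mathlib
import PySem

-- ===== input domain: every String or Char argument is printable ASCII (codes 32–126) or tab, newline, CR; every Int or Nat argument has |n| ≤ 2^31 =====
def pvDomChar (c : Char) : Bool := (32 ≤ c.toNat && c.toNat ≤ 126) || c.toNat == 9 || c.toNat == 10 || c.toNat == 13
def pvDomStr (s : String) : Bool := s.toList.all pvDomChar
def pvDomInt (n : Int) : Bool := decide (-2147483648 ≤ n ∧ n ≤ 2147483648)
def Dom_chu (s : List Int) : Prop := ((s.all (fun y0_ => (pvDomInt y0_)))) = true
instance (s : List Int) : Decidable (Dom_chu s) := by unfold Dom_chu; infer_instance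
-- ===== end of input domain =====

-- B replaces A's quadratic move-to-end mutation by one backward scan with a seen-set
-- plus a final reversal (faster: O(n) set lookups instead of O(n) list scan + remove per element).

-- ===== PORT A =====
-- a.remove(i) under the guard 'i in a' removes the first == occurrence: exactly List.erase.
def chu (s : List Int) : List Int :=
  s.foldl (fun a i => if i ∈ a then (a.erase i) ++ [i] else a ++ [i]) []

-- ===== PORT B =====
def chu_alt (s : List Int) : List Int :=
  let items := s
  let p := items.reverse.foldl
    (fun (st : PySem.Set Int × List Int) i =>
      if i ∈ st.1 then st else (st.1.add i, st.2 ++ [i]))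
    (PySem.Set.empty, [])
  p.2.reverse

-- ===== PRECONDITION & SPEC =====
def Spec_chu (s : List Int) (out : List Int) : Prop := out = chu_alt s
instance (s : List Int) (out : List Int) : Decidable (Spec_chu s out) := by unfold Spec_chu; infer_instance

-- ===== CLAIM (what is proved, stated in full; the proofs are below) =====
def Claim_equal_chu : Prop := ∀ (s : List Int), Dom_chu s → Spec_chu s (chu s)

-- ===== LEMMAS AND PROOFS =====

-- Reference function: the distinct elements of s ordered by LAST occurrence.
def ld : List Int → List Int
  | [] => []
  | x :: xs => if x ∈ xs then ld xs else x :: ld xs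

theorem filter_ext_int (l : List Int) {p q : Int → Bool} (h : ∀ x, p x = q x) :
    l.filter p = l.filter q := by
  congr 1
  funext x
  exact h x

theorem ld_append_singleton (t : List Int) (x : Int) :
    ld (t ++ [x]) = (ld t).filter (fun y => decide (y ≠ x)) ++ [x] := by
  induction t with
  | nil => simp [ld]
  | cons y t ih =>
    by_cases hy : y ∈ t
    · simp [ld, hy, ih]
    · by_cases hyx : y = x
      · subst hyx
        simp [ld, hy, ih]
      · simp [ld, hy, hyx, ih]

-- merging two negative filters into non-membership in a cons (pointwise, no side condition)
theorem filter_erase_cons (a : List Int) (i : Int) (t : List Int) :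
    List.filter (fun x => decide (x ∉ t)) (List.filter (fun x => decide (x ≠ i)) a)
      = List.filter (fun x => decide (x ∉ i :: t)) a := by
  rw [List.filter_filter]
  apply filter_ext_int
  intro x
  by_cases h1 : x = i <;> by_cases h2 : x ∈ t <;> simp [h1, h2]

-- A computes ld: loop invariant for A's fold.
theorem chu_fold_char (s a : List Int) (ha : a.Nodup) :
    s.foldl (fun a i => if i ∈ a then (a.erase i) ++ [i] else a ++ [i]) a
      = a.filter (fun x => decide (x ∉ s)) ++ ld s := by
  induction s generalizing a with
  | nil => simp [ld]
  | cons i t ih =>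
    have hstep : ((if i ∈ a then (a.erase i) ++ [i] else a ++ [i]) : List Int).Nodup := by
      by_cases hi : i ∈ a
      · simp only [hi, if_true]
        simp only [List.nodup_append, List.nodup_cons]
        refine ⟨ha.erase i, by simp, ?_⟩
        intro x hx b hb
        simp only [List.mem_singleton] at hb
        subst hb
        exact ((List.Nodup.mem_erase_iff ha).1 hx).1
      · simp only [hi, if_false]
        simp only [List.nodup_append, List.nodup_cons]
        refine ⟨ha, by simp, ?_⟩
        intro x hx b hb
        simp only [List.mem_singleton] at hb
        subst hb
        exact fun h => hi (h ▸ hx)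
    have herase : a.erase i = a.filter (fun x => decide (x ≠ i)) := by
      rw [List.Nodup.erase_eq_filter ha]
      apply filter_ext_int
      intro x
      by_cases h : x = i <;> simp [h]
    simp only [List.foldl_cons]
    rw [ih _ hstep]
    by_cases hi : i ∈ a
    · simp only [hi, if_true, herase, List.filter_append, filter_erase_cons]
      by_cases hit : i ∈ t
      · simp [ld, hit]
      · simp [ld, hit]
    · simp only [hi, if_false, List.filter_append]
      by_cases hit : i ∈ t
      all_goals
        simp [ld, hit]
        apply List.filter_congr
        intro x hx
        have hxi : x ≠ i := fun h => hi (h ▸ hx)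
        simp [hxi]

theorem chu_eq_ld (s : List Int) : chu s = ld s := by
  unfold chu
  rw [chu_fold_char s [] List.nodup_nil]
  simp

-- B's fold characterisation: the output accumulates ld of the reversed remaining input,
-- filtered by the seen-set, in reverse order.
theorem chu_alt_fold_char (l : List Int) (seen : PySem.Set Int) (out : List Int) :
    (l.foldl (fun (st : PySem.Set Int × List Int) i =>
        if i ∈ st.1 then st else (st.1.add i, st.2 ++ [i])) (seen, out)).2
      = out ++ ((ld l.reverse).filter (fun x => decide (x ∉ seen))).reverse := by
  induction l generalizing seen out with
  | nil => simp [ld]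
  | cons i t ih =>
    simp only [List.foldl_cons, List.reverse_cons, ld_append_singleton, List.filter_append,
      List.filter_filter]
    by_cases hi : i ∈ seen
    · simp only [hi, if_true]
      rw [ih]
      have h1 : (List.filter (fun x => decide (x ∉ seen)) [i]) = [] := by simp [hi]
      rw [h1, List.append_nil]
      have h2 : List.filter (fun a => decide (a ∉ seen) && decide (a ≠ i)) (ld t.reverse)
          = List.filter (fun x => decide (x ∉ seen)) (ld t.reverse) := by
        apply filter_ext_int
        intro x
        by_cases hx : x ∈ seen
        · simp [hx]
        · have : x ≠ i := fun h => hx (h ▸ hi)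
          simp [hx, this]
      rw [h2]
    · simp only [hi, if_false]
      rw [ih]
      have h1 : (List.filter (fun x => decide (x ∉ seen)) [i]) = [i] := by simp [hi]
      rw [h1]
      have h2 : List.filter (fun x => decide (x ∉ seen.add i)) (ld t.reverse)
          = List.filter (fun a => decide (a ∉ seen) && decide (a ≠ i)) (ld t.reverse) := by
        apply filter_ext_int
        intro x
        by_cases hx1 : x = i <;> by_cases hx2 : x ∈ seen <;>
          simp [PySem.Set.mem_add, hx1, hx2]
      rw [h2, List.reverse_append]
      simp

theorem chu_alt_eq_ld (s : List Int) : chu_alt s = ld s := by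
  show (List.foldl (fun (st : PySem.Set Int × List Int) i =>
      if i ∈ st.1 then st else (st.1.add i, st.2 ++ [i]))
      (PySem.Set.empty, []) s.reverse).2.reverse = ld s
  rw [chu_alt_fold_char]
  simp [PySem.Set.empty]

-- ===== VERDICT (by name: the statement is the Claim_ definition above) =====
theorem chu_spec : Claim_equal_chu := by
  intro s _
  unfold Spec_chu
  rw [chu_eq_ld, chu_alt_eq_ld]
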